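-- pv_equiv track=rewrite | github.com/aabine/alx-higher_level_programming | 0x07-python-test_driven_development/5-text_indentation.py | text_indentation
-- ===== SOURCE A (Python) =====
-- def text_indentation(text):
--     """
--     Takes a string `text` as input and performs text indentation.
--
--     Parameters:
--     - text (str): The string to be indented.
--
--     Raises:
--     - TypeError: If `text` is not a string.
--
--     Returns:
--     - str: The indented text.
--     """
--     if not isinstance(text, str):
--         raise TypeError("text must be a string")
--
--     index = 0
--     result = ""
--     while index < len(text) and text[index] == ' ':
--         index += 1
--
--     while index < len(text):
--         result += text[index]
--         if text[index] == "\n" or text[index] in ".?:":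
--             if text[index] in ".?:":
--                 result += "\n"
--             index += 1
--             while index < len(text) and text[index] == ' ':
--                 index += 1
--             continue
--         index += 1
--
--     return result
-- ===== SOURCE B (Python) =====
-- def text_indentation(text):
--     if not isinstance(text, str):
--         raise TypeError("text must be a string")
--     s = text
--     for p in ".?:":
--         s = s.replace(p, p + "\n")
--     return "\n".join(seg.lstrip(" ") for seg in s.split("\n"))
-- ===== Notes on version B (the rewrite author's own statement) =====
-- stated objective: faster
-- what changed: Replaced A's index-based stateful character scan, which grows the result by repeated string concatenation and uses an inner space-skipping while loop, with three whole-string passes: replace each punctuation character with itself plus a newline, then split on newlines, strip the leading spaces of each segment and rejoin.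
import Mathlib
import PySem

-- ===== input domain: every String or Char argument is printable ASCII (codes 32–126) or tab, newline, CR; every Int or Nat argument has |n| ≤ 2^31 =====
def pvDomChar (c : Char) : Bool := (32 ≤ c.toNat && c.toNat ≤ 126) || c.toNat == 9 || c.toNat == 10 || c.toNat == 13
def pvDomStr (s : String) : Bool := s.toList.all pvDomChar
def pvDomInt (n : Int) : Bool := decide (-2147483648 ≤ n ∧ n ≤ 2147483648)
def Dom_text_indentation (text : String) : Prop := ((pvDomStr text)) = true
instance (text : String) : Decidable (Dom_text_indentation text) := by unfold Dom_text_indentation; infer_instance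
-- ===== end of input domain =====

-- B replaces A's stateful index scan (which grows the result by repeated string
-- concatenation, quadratic, and uses an inner space-skipping while loop) by three linear
-- whole-string passes: replace each punctuation character with itself plus a newline, then
-- split on newlines, strip the leading spaces of each segment and rejoin; same return value.
-- (A's TypeError branch is unreachable under the type convention: text is always a str.)

-- ===== PORT A =====
-- `while index < len(text) and text[index] == ' ': index += 1` — skip spaces at the cursor
def aSkipSpaces : List Char → List Char
  | [] => []
  | c :: rest => if c == ' ' then aSkipSpaces rest else c :: rest

-- `text[index] in ".?:"`
def aPunct (c : Char) : Bool := c == '.' || c == '?' || c == ':'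

theorem aSkipSpaces_length_le (l : List Char) : (aSkipSpaces l).length ≤ l.length := by
  induction l with
  | nil => simp [aSkipSpaces]
  | cons c rest ih => rw [aSkipSpaces]; split <;> simp <;> omega

-- the main `while index < len(text)` loop: result += text[index]; after '\n' or '.?:'
-- (adding '\n' after punctuation) skip the following spaces and continue
def aLoop : List Char → List Char
  | [] => []
  | c :: rest =>
    if c == '\n' || aPunct c then
      (c :: (if aPunct c then ['\n'] else [])) ++ aLoop (aSkipSpaces rest)
    else
      c :: aLoop rest
termination_by l => l.length
decreasing_by
  · have := aSkipSpaces_length_le rest; simp; omega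
  · simp

def text_indentation (text : String) : String :=
  String.mk (aLoop (aSkipSpaces text.toList))

-- ===== PORT B =====
-- `s = s.replace(p, p + "\n")` for p in ".?:", then
-- `"\n".join(seg.lstrip(" ") for seg in s.split("\n"))`.
-- `seg.lstrip(" ")` is hand-ported as dropWhile (· == ' ') (exact: lstrip with the explicit
-- char set " " removes exactly the leading spaces); `s.split("\n")` with its non-empty
-- separator is PySem.Chars.splitOn.
def text_indentation_alt (text : String) : String :=
  let s1 := PySem.Str.replace text "." ".\n"
  let s2 := PySem.Str.replace s1 "?" "?\n"
  let s3 := PySem.Str.replace s2 ":" ":\n"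
  String.mk (PySem.Chars.join ['\n']
    ((PySem.Chars.splitOn s3.toList ['\n']).map (fun seg => seg.dropWhile (fun c => c == ' '))))

-- ===== PRECONDITION & SPEC =====
def Spec_text_indentation (text : String) (out : String) : Prop := out = text_indentation_alt text
instance (text : String) (out : String) : Decidable (Spec_text_indentation text out) := by unfold Spec_text_indentation; infer_instance

-- ===== CLAIM (what is proved, stated in full; the proofs are below) =====
def Claim_equal_text_indentation : Prop := ∀ (text : String), Dom_text_indentation text → Spec_text_indentation text (text_indentation text)

-- ===== LEMMAS AND PROOFS =====

-- proof-side vocabulary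
def pvIns (c : Char) : List Char := if aPunct c then [c, '\n'] else [c]
def pvLsp (l : List Char) : List Char := l.dropWhile (fun c => c == ' ')

-- "remove the spaces after every newline"
def pvFNL : List Char → List Char
  | [] => []
  | c :: r => if c == '\n' then c :: pvFNL (pvLsp r) else c :: pvFNL r
termination_by l => l.length
decreasing_by
  · have := List.length_dropWhile_le (fun c => c == ' ') r; simp [pvLsp]; omega
  · simp

-- split at newlines, recursive specification of s.split("\n")
def pvSplitNL : List Char → List (List Char)
  | [] => [[]]
  | c :: r =>
    if c == '\n' then [] :: pvSplitNL r
    else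
      match pvSplitNL r with
      | [] => [[c]]
      | h :: t => (c :: h) :: t

theorem pvSplitNL_ne_nil (l : List Char) : pvSplitNL l ≠ [] := by
  induction l with
  | nil => simp [pvSplitNL]
  | cons c r ih =>
    rw [pvSplitNL]
    split
    · simp
    · split <;> simp

theorem pvFNL_nil : pvFNL [] = [] := by rw [pvFNL]

theorem pvFNL_cons (c : Char) (r : List Char) :
    pvFNL (c :: r) = if c == '\n' then c :: pvFNL (pvLsp r) else c :: pvFNL r := by
  rw [pvFNL]

theorem aLoop_nil : aLoop [] = [] := by rw [aLoop]

theorem aLoop_cons (c : Char) (rest : List Char) :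
    aLoop (c :: rest) =
      if c == '\n' || aPunct c then
        (c :: (if aPunct c then ['\n'] else [])) ++ aLoop (aSkipSpaces rest)
      else
        c :: aLoop rest := by
  rw [aLoop]

theorem aSkipSpaces_eq_lsp (l : List Char) : aSkipSpaces l = pvLsp l := by
  induction l with
  | nil => rfl
  | cons c r ih => rw [aSkipSpaces, pvLsp, List.dropWhile_cons]; split <;> simp_all [pvLsp]

theorem replace_go_single (a : Char) (v : List Char) :
    ∀ (l acc : List Char) (fuel : Nat), l.length ≤ fuel →
      PySem.Chars.replace.go [a] v fuel l acc
        = acc.reverse ++ l.flatMap (fun c => if c == a then v else [c]) := by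
  intro l
  induction l with
  | nil => intro acc fuel _; cases fuel <;> simp [PySem.Chars.replace.go]
  | cons c t ih =>
    intro acc fuel hf
    cases fuel with
    | zero => simp at hf
    | succ f =>
      simp only [List.length_cons] at hf
      rw [PySem.Chars.replace.go]
      by_cases h : a = c
      · subst h
        rw [if_pos (by simp [List.isPrefixOf])]
        simp only [List.length_cons, List.length_nil, List.drop_succ_cons, List.drop_zero]
        rw [ih (v.reverse ++ acc) f (by omega)]
        simp
      · rw [if_neg (by simp [List.isPrefixOf, h]), ih (c :: acc) f (by omega)]
        simp [Ne.symm h]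

theorem replace_single (l : List Char) (a : Char) (v : List Char) :
    PySem.Chars.replace l [a] v = l.flatMap (fun c => if c == a then v else [c]) := by
  rw [PySem.Chars.replace]
  rw [if_neg (by simp)]
  simpa using replace_go_single a v l [] l.length le_rfl

-- the three sequential replaces amount to one flatMap of pvIns
theorem flat3 (l : List Char) :
    ((l.flatMap (fun c => if c == '.' then ['.', '\n'] else [c])).flatMap
        (fun c => if c == '?' then ['?', '\n'] else [c])).flatMap
        (fun c => if c == ':' then [':', '\n'] else [c])
      = l.flatMap pvIns := by
  induction l with
  | nil => rfl
  | cons c r ih =>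
    simp only [List.flatMap_cons, List.flatMap_append, ih]
    congr 1
    by_cases h1 : c = '.' <;> by_cases h2 : c = '?' <;> by_cases h3 : c = ':' <;>
      simp_all [pvIns, aPunct]

-- dropping leading spaces commutes with the flatMap (spaces map to themselves,
-- every other pvIns-image starts with a non-space)
theorem lsp_flatMap_ins (l : List Char) :
    pvLsp (l.flatMap pvIns) = (pvLsp l).flatMap pvIns := by
  induction l with
  | nil => rfl
  | cons c r ih =>
    by_cases h : c = ' '
    · subst h
      have : pvIns ' ' = [' '] := by decide
      simp only [List.flatMap_cons, this, pvLsp, List.dropWhile_cons] at *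
      simpa using ih
    · have hp : pvIns c = c :: (if aPunct c then ['\n'] else []) := by
        rw [pvIns]; split <;> simp
      simp only [pvLsp, List.dropWhile_cons, beq_iff_eq, h, if_false, List.flatMap_cons, hp,
        List.cons_append]

theorem aPunct_ne_nl (c : Char) (h : aPunct c = true) : (c == '\n') = false := by
  rw [aPunct] at h
  rcases Bool.or_eq_true_iff.mp h with h' | h'
  · rcases Bool.or_eq_true_iff.mp h' with h'' | h'' <;>
      · have := beq_iff_eq.mp h''; subst this; decide
  · have := beq_iff_eq.mp h'; subst this; decide

-- A's loop computes pvFNL of the flatMap image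
theorem aLoop_eq_fnl (l : List Char) : aLoop l = pvFNL (l.flatMap pvIns) := by
  induction l using aLoop.induct with
  | case1 => simp [aLoop_nil, pvFNL_nil]
  | case2 c rest h ih =>
    by_cases hp : aPunct c = true
    · have hcn := aPunct_ne_nl c hp
      have hins : pvIns c = [c, '\n'] := by rw [pvIns, if_pos hp]
      rw [aLoop_cons, if_pos h, if_pos hp]
      simp only [List.flatMap_cons, hins, List.cons_append, List.nil_append]
      rw [pvFNL_cons, if_neg (by simp [hcn]), pvFNL_cons, if_pos (by rfl)]
      rw [lsp_flatMap_ins, ← aSkipSpaces_eq_lsp, ih]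
    · have hc : c = '\n' := by
        rcases Bool.or_eq_true_iff.mp h with h' | h'
        · exact beq_iff_eq.mp h'
        · exact absurd h' hp
      subst hc
      have hins : pvIns '\n' = ['\n'] := by rw [pvIns, if_neg hp]
      rw [aLoop_cons, if_pos h, if_neg hp]
      simp only [List.flatMap_cons, hins, List.cons_append, List.nil_append]
      rw [pvFNL_cons, if_pos (by rfl)]
      rw [lsp_flatMap_ins, ← aSkipSpaces_eq_lsp, ih]
  | case3 c rest h ih =>
    have hcn : (c == '\n') = false := by
      cases hc : c == '\n' with
      | true => exact absurd (by simp [hc]) h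
      | false => rfl
    have hp : aPunct c = false := by
      cases hq : aPunct c with
      | true => exact absurd (by simp [hq]) h
      | false => rfl
    have hins : pvIns c = [c] := by rw [pvIns, if_neg (by simp [hp])]
    rw [aLoop_cons, if_neg h]
    simp only [List.flatMap_cons, hins, List.cons_append, List.nil_append]
    rw [pvFNL_cons, if_neg (by simp [hcn]), ih]

-- PySem's splitOn with separator "\n" is pvSplitNL
theorem splitOn_go_nl :
    ∀ (l cur : List Char) (acc : List (List Char)) (fuel : Nat), l.length ≤ fuel →
      PySem.Chars.splitOn.go ['\n'] fuel l cur acc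
        = acc.reverse ++ (match pvSplitNL l with
            | [] => []
            | h :: t => (cur.reverse ++ h) :: t) := by
  intro l
  induction l with
  | nil => intro cur acc fuel _; cases fuel <;> simp [PySem.Chars.splitOn.go, pvSplitNL]
  | cons c rest ih =>
    intro cur acc fuel hf
    cases fuel with
    | zero => simp at hf
    | succ f =>
      simp only [List.length_cons] at hf
      rw [PySem.Chars.splitOn.go]
      by_cases h : c = '\n'
      · subst h
        rw [if_pos (by simp [List.isPrefixOf])]
        simp only [List.length_cons, List.length_nil, List.drop_succ_cons, List.drop_zero]
        rw [ih [] (cur.reverse :: acc) f (by omega)]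
        rw [pvSplitNL, if_pos (by rfl)]
        rcases hne : pvSplitNL rest with _ | ⟨h', t'⟩
        · exact absurd hne (pvSplitNL_ne_nil rest)
        · simp
      · rw [if_neg (by simp [List.isPrefixOf, Ne.symm h]), ih (c :: cur) acc f (by omega)]
        rw [pvSplitNL, if_neg (by simp [h])]
        rcases hne : pvSplitNL rest with _ | ⟨h', t'⟩
        · exact absurd hne (pvSplitNL_ne_nil rest)
        · simp

theorem splitOn_eq_splitNL (l : List Char) :
    PySem.Chars.splitOn l ['\n'] = pvSplitNL l := by
  rw [PySem.Chars.splitOn, splitOn_go_nl l [] [] (l.length + 1) (by omega)]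
  rcases hne : pvSplitNL l with _ | ⟨h, t⟩
  · exact absurd hne (pvSplitNL_ne_nil l)
  · simp

-- lsp only touches the head segment of the newline split
theorem splitNL_lsp (l : List Char) :
    pvSplitNL (pvLsp l) = (match pvSplitNL l with
      | [] => []
      | h :: t => pvLsp h :: t) := by
  induction l with
  | nil => simp [pvSplitNL, pvLsp]
  | cons c r ih =>
    by_cases h : c = ' '
    · subst h
      have h1 : pvLsp (' ' :: r) = pvLsp r := by simp [pvLsp, List.dropWhile_cons]
      rw [h1, ih, pvSplitNL, if_neg (by decide)]
      rcases hne : pvSplitNL r with _ | ⟨h', t'⟩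
      · exact absurd hne (pvSplitNL_ne_nil r)
      · simp [pvLsp, List.dropWhile_cons]
    · have h1 : pvLsp (c :: r) = c :: r := by simp [pvLsp, List.dropWhile_cons, h]
      rw [h1]
      rw [pvSplitNL]
      by_cases hnl : c = '\n'
      · subst hnl; rw [if_pos (by rfl)]; simp [pvLsp]
      · rw [if_neg (by simp [hnl])]
        rcases hne : pvSplitNL r with _ | ⟨h', t'⟩
        · exact absurd hne (pvSplitNL_ne_nil r)
        · simp [pvLsp, List.dropWhile_cons, h]

-- join of the split with every segment AFTER a newline lstripped = pvFNL
theorem join_headkeep (l : List Char) :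
    PySem.Chars.join ['\n'] (match pvSplitNL l with
      | [] => []
      | h :: t => h :: t.map pvLsp) = pvFNL l := by
  induction l using pvFNL.induct with
  | case1 => simp [pvSplitNL, PySem.Chars.join_singleton, pvFNL_nil]
  | case2 c r hc ih =>
    have hc' : c = '\n' := by simpa using hc
    subst hc'
    rw [pvSplitNL, if_pos (by rfl)]
    rcases hne : pvSplitNL r with _ | ⟨h', t'⟩
    · exact absurd hne (pvSplitNL_ne_nil r)
    · simp only [List.map_cons]
      rw [PySem.Chars.join_cons_cons]
      have hmap : pvLsp h' :: t'.map pvLsp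
          = (match pvSplitNL (pvLsp r) with
             | [] => []
             | h :: t => h :: t.map pvLsp) := by
        rw [splitNL_lsp, hne]
      rw [hmap, ih]
      rw [pvFNL_cons, if_pos (by rfl)]
      simp
  | case3 c r hc ih =>
    rw [pvSplitNL, if_neg hc]
    rcases hne : pvSplitNL r with _ | ⟨h', t'⟩
    · exact absurd hne (pvSplitNL_ne_nil r)
    · rw [pvFNL_cons, if_neg hc]
      rw [hne] at ih
      rcases ht : t' with _ | ⟨q, t''⟩
      · subst ht
        simp only [List.map_nil] at ih ⊢
        rw [PySem.Chars.join_singleton] at ih ⊢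
        simp [ih]
      · subst ht
        simp only [List.map_cons] at ih ⊢
        rw [PySem.Chars.join_cons_cons] at ih ⊢
        simp [← ih]

-- B's join-of-lstripped-segments = pvFNL after lstrip
theorem join_map_lsp (l : List Char) :
    PySem.Chars.join ['\n'] ((pvSplitNL l).map pvLsp) = pvFNL (pvLsp l) := by
  rw [← join_headkeep (pvLsp l), splitNL_lsp]
  rcases hne : pvSplitNL l with _ | ⟨h, t⟩
  · exact absurd hne (pvSplitNL_ne_nil l)
  · simp

theorem text_indentation_spec : Claim_equal_text_indentation := by
  intro text _
  unfold Spec_text_indentation text_indentation text_indentation_alt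
  apply congrArg String.mk
  rw [PySem.Str.toList_replace, PySem.Str.toList_replace, PySem.Str.toList_replace]
  have hdot : (".\n" : String).toList = ['.', '\n'] := by decide
  have hq : ("?\n" : String).toList = ['?', '\n'] := by decide
  have hcol : (":\n" : String).toList = [':', '\n'] := by decide
  have h1 : ((".").toList : List Char) = ['.'] := by decide
  have h2 : (("?").toList : List Char) = ['?'] := by decide
  have h3 : ((":").toList : List Char) = [':'] := by decide
  rw [hdot, hq, hcol, h1, h2, h3]
  rw [replace_single, replace_single, replace_single, flat3]
  rw [splitOn_eq_splitNL]
  have hfun : (fun seg : List Char => seg.dropWhile (fun c => c == ' ')) = pvLsp := by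
    funext seg; rfl
  rw [hfun, join_map_lsp]
  rw [aSkipSpaces_eq_lsp, aLoop_eq_fnl, lsp_flatMap_ins]
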